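-- pv_equiv track=rewrite | github.com/Oracking/advent-of-code-2023 | solutions/day_13/part_2.py | find_reflection_point
-- ===== SOURCE A (Python) =====
-- from typing import List, Tuple
--
-- def find_reflection_point(grid: Tuple[str]) -> int:
--     max_reflection_size = 0
--     reflection_index = len(grid) - 1
--     for index in range(len(grid)):
--         min_size = min(index + 1, len(grid) - (index + 1))
--         left_side = grid[index+1-min_size:index+1]
--         right_side = grid[index+1: index+1+min_size][::-1]
--         if left_side == right_side and min_size > max_reflection_size:
--             reflection_index = index
--             max_reflection_size = min_size
--     return reflection_index
-- ===== SOURCE B (Python) =====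
-- def find_reflection_point(grid):
--     # Centre-expansion: for each boundary, walk two pointers outward and
--     # accept the boundary iff the expansion falls off an edge.
--     n = len(grid)
--     best_arm = 0
--     best_index = n - 1
--     for i in range(n - 1):
--         a, b = i, i + 1
--         while a >= 0 and b < n and grid[a] == grid[b]:
--             a -= 1
--             b += 1
--         if a < 0 or b >= n:
--             arm = min(i + 1, n - 1 - i)
--             if arm > best_arm:
--                 best_arm = arm
--                 best_index = i
--     return best_index
-- ===== Notes on version B (the rewrite author's own statement) =====
-- stated objective: alternative
-- what changed: Replaces A's per-index slice building and reversed-slice comparison with a two-pointer centre expansion from each boundary that stops at the first mismatching pair, so no intermediate lists are built; it trades A's C-level slice comparisons for an explicit early-exiting pairwise walk.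
import Mathlib
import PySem

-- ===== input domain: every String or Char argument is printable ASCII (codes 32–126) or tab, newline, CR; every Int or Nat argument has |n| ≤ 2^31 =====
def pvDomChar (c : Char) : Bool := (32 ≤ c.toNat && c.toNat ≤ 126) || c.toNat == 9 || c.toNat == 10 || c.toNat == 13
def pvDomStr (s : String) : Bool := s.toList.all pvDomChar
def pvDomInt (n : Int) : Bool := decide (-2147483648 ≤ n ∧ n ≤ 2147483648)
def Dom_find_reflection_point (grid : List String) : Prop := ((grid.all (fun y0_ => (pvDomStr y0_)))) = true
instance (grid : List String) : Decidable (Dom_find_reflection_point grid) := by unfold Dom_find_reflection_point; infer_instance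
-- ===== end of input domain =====

-- B replaces A's per-index slice building + reversed-slice comparison by a two-pointer
-- centre expansion from each boundary that stops at the first mismatch; same return value.

-- ===== PORT A =====
-- literal transliteration of A: for index in range(len(grid)), build the two slices
-- (right one reversed with [::-1]) and keep the largest reflection size
def find_reflection_point (grid : List String) : Int :=
  let n : Int := (grid.length : Int)
  let res := (PySem.List.pyRange 0 n 1).foldl
    (fun (st : Int × Int) (index : Int) =>
      let minSize := min (index + 1) (n - (index + 1))
      let leftSide := PySem.List.slice grid (some (index + 1 - minSize)) (some (index + 1))
      let rightSide := (PySem.List.slice? (PySem.List.slice grid (some (index + 1)) (some (index + 1 + minSize))) none none (-1)).getD []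
      if leftSide == rightSide ∧ minSize > st.1 then (minSize, index) else st)
    (0, n - 1)
  res.2

-- ===== PORT B =====
-- the while-loop of Source B: expand (a, b) outward while both indices are in range and the
-- rows match; returns true iff the loop exited because a pointer left the grid
def pvExpandOK (grid : List String) (a b : Int) : Bool :=
  if h : 0 ≤ a ∧ b < (grid.length : Int) then
    if PySem.List.pyGet? grid a == PySem.List.pyGet? grid b then
      pvExpandOK grid (a - 1) (b + 1)
    else false
  else true
termination_by ((grid.length : Int) - b).toNat
decreasing_by omega

def find_reflection_point_alt (grid : List String) : Int :=
  let n : Int := (grid.length : Int)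
  let res := (PySem.List.pyRange 0 (n - 1) 1).foldl
    (fun (st : Int × Int) (i : Int) =>
      if pvExpandOK grid i (i + 1) then
        let arm := min (i + 1) (n - 1 - i)
        if arm > st.1 then (arm, i) else st
      else st)
    (0, n - 1)
  res.2

-- ===== PRECONDITION & SPEC =====
def Spec_find_reflection_point (grid : List String) (out : Int) : Prop := out = find_reflection_point_alt grid
instance (grid : List String) (out : Int) : Decidable (Spec_find_reflection_point grid out) := by unfold Spec_find_reflection_point; infer_instance

-- ===== CLAIM (what is proved, stated in full; the proofs are below) =====
def Claim_equal_find_reflection_point : Prop := ∀ (grid : List String), Dom_find_reflection_point grid → Spec_find_reflection_point grid (find_reflection_point grid)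

-- ===== LEMMAS AND PROOFS =====

-- the expansion loop reaches an edge iff all m mirrored pairs match,
-- where m = min (a+1) (len-b) is the number of comparisons available
lemma pvExpandOK_eq (grid : List String) : ∀ (m : ℕ) (a b : Int), 0 ≤ b → a < b →
    (m : Int) ≤ a + 1 → (b : Int) + m ≤ grid.length →
    (a + 1 = (m : Int) ∨ b + (m : Int) = grid.length) →
    pvExpandOK grid a b =
      decide (∀ j : ℕ, j < m → grid.getD (a - j).toNat "" = grid.getD (b + j).toNat "") := by
  intro m
  induction m with
  | zero =>
    intro a b hb hab hma hbm hedge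
    rw [pvExpandOK]
    have hg : ¬ (0 ≤ a ∧ b < (grid.length : Int)) := by
      simp only [Nat.cast_zero] at hedge; omega
    simp [hg]
  | succ m ih =>
    intro a b hb hab hma hbm hedge
    have ha : 0 ≤ a := by push_cast at hma; omega
    have hblen : b < (grid.length : Int) := by push_cast at hbm; omega
    have halen : a < (grid.length : Int) := by omega
    rw [pvExpandOK, dif_pos ⟨ha, hblen⟩,
       PySem.List.pyGet?_eq_some_getElem grid ha halen, PySem.List.pyGet?_eq_some_getElem grid hb hblen]
    by_cases heq : grid[a.toNat] = grid[b.toNat]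
    · rw [if_pos (by simp [heq]),
        ih (a - 1) (b + 1) (by omega) (by omega) (by push_cast at hma ⊢; omega)
          (by push_cast at hbm ⊢; omega) (by push_cast at hedge ⊢; omega)]
      rw [decide_eq_decide]
      constructor
      · intro h j hj
        cases j with
        | zero =>
          simp only [Nat.cast_zero, sub_zero, add_zero]
          rw [List.getD_eq_getElem _ _ (by omega), List.getD_eq_getElem _ _ (by omega)]
          exact heq
        | succ j' =>
          have e1 : a - ((j' + 1 : ℕ) : ℤ) = (a - 1) - (j' : ℤ) := by push_cast; ring
          have e2 : b + ((j' + 1 : ℕ) : ℤ) = (b + 1) + (j' : ℤ) := by push_cast; ring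
          rw [e1, e2]
          exact h j' (by omega)
      · intro h j hj
        have e1 : (a - 1) - (j : ℤ) = a - ((j + 1 : ℕ) : ℤ) := by push_cast; ring
        have e2 : (b + 1) + (j : ℤ) = b + ((j + 1 : ℕ) : ℤ) := by push_cast; ring
        rw [e1, e2]
        exact h (j + 1) (by omega)
    · rw [if_neg (by simp [heq])]
      symm
      simp only [decide_eq_false_iff_not]
      intro h
      have := h 0 (by omega)
      simp only [Nat.cast_zero, sub_zero, add_zero] at this
      rw [List.getD_eq_getElem _ _ (by omega), List.getD_eq_getElem _ _ (by omega)] at this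
      exact heq this

-- A's slice pair (in take/drop form) agree iff all mirrored pairs around the boundary match
lemma slice_pairs (grid : List String) (i' m' : ℕ) (h1 : m' ≤ i' + 1) (h2 : i' + 1 + m' ≤ grid.length) :
    ((grid.drop (i' + 1 - m')).take m' = ((grid.drop (i' + 1)).take m').reverse) ↔
    (∀ j : ℕ, j < m' → grid.getD (i' - j) "" = grid.getD (i' + 1 + j) "") := by
  have hL1 : ((grid.drop (i' + 1 - m')).take m').length = m' := by
    simp [List.length_take, List.length_drop]; omega
  have hL2 : (((grid.drop (i' + 1)).take m').reverse).length = m' := by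
    simp [List.length_take, List.length_drop]; omega
  have g1 : ∀ k, k < m' → ∀ (h : k < ((grid.drop (i' + 1 - m')).take m').length),
      ((grid.drop (i' + 1 - m')).take m')[k] = grid.getD (i' + 1 - m' + k) "" := by
    intro k hk h
    rw [List.getElem_take, List.getElem_drop, ← List.getD_eq_getElem grid "" (by omega)]
  have g2 : ∀ k, k < m' → ∀ (h : k < (((grid.drop (i' + 1)).take m').reverse).length),
      (((grid.drop (i' + 1)).take m').reverse)[k] = grid.getD (i' + 1 + (m' - 1 - k)) "" := by
    intro k hk h
    rw [List.getElem_reverse]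
    have hlen : ((grid.drop (i' + 1)).take m').length = m' := by
      simp [List.length_take, List.length_drop]; omega
    rw [List.getElem_take, List.getElem_drop, ← List.getD_eq_getElem grid "" (by omega)]
    rw [show (List.take m' (List.drop (i' + 1) grid)).length - 1 - k = m' - 1 - k by rw [hlen]]
  constructor
  · intro hL j hj
    have hk : m' - 1 - j < m' := by omega
    have e := congrArg (fun l => l.getD (m' - 1 - j) "") hL
    simp only at e
    rw [List.getD_eq_getElem _ _ (by omega), List.getD_eq_getElem _ _ (by omega)] at e
    rw [g1 _ hk _, g2 _ hk _] at e
    rw [show i' + 1 - m' + (m' - 1 - j) = i' - j by omega,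
        show m' - 1 - (m' - 1 - j) = j by omega] at e
    exact e
  · intro h
    apply List.ext_getElem (by rw [hL1, hL2])
    intro k hk1 hk2
    have hk : k < m' := by omega
    rw [g1 _ hk _, g2 _ hk _]
    have := h (m' - 1 - k) (by omega)
    rw [show i' - (m' - 1 - k) = i' + 1 - m' + k by omega] at this
    exact this

-- A's slice comparison expressed as the mirrored-pairs condition
lemma pvSlice_eq (grid : List String) (i : Int) (hi : 0 ≤ i) (hin : i + 1 < (grid.length : Int)) :
    (PySem.List.slice grid (some (i + 1 - min (i + 1) ((grid.length : Int) - (i + 1)))) (some (i + 1)) ==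
      (PySem.List.slice? (PySem.List.slice grid (some (i + 1)) (some (i + 1 + min (i + 1) ((grid.length : Int) - (i + 1))))) none none (-1)).getD []) =
      decide (∀ j : ℕ, j < (min (i + 1) ((grid.length : Int) - (i + 1))).toNat →
        grid.getD (i - (j : Int)).toNat "" = grid.getD (i + 1 + (j : Int)).toNat "") := by
  set n : Int := (grid.length : Int) with hn
  set m : Int := min (i + 1) (n - (i + 1)) with hm
  have hm2 : m ≤ i + 1 := min_le_left _ _
  have hm3 : m ≤ n - (i + 1) := min_le_right _ _
  have hm0 : 0 ≤ m := by omega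
  rw [PySem.List.slice_toNat _ (by omega) (by omega),
      PySem.List.slice_toNat _ (by omega) (by omega),
      PySem.List.slice?_none_none_neg_one]
  simp only [Option.getD_some]
  rw [show (i + 1 - m).toNat = i.toNat + 1 - m.toNat by omega,
      show (i + 1).toNat = i.toNat + 1 by omega,
      show (i + 1 + m).toNat = i.toNat + 1 + m.toNat by omega,
      show i.toNat + 1 - (i.toNat + 1 - m.toNat) = m.toNat by omega,
      show i.toNat + 1 + m.toNat - (i.toNat + 1) = m.toNat by omega]
  rw [Bool.eq_iff_iff]
  simp only [beq_iff_eq, decide_eq_true_eq]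
  rw [slice_pairs grid i.toNat m.toNat (by omega) (by omega)]
  constructor
  · intro h j hj
    rw [show (i - (j : Int)).toNat = i.toNat - j by omega,
        show (i + 1 + (j : Int)).toNat = i.toNat + 1 + j by omega]
    exact h j hj
  · intro h j hj
    have := h j hj
    rw [show (i - (j : Int)).toNat = i.toNat - j by omega,
        show (i + 1 + (j : Int)).toNat = i.toNat + 1 + j by omega] at this
    exact this

-- one loop step of A equals one loop step of B on every index of the common range
lemma pvStep_eq (grid : List String) (st : Int × Int) (i : Int) (h0 : 0 ≤ i)
    (h1 : i < (grid.length : Int) - 1) :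
    (if (PySem.List.slice grid (some (i + 1 - min (i + 1) ((grid.length : Int) - (i + 1)))) (some (i + 1)) ==
        (PySem.List.slice? (PySem.List.slice grid (some (i + 1)) (some (i + 1 + min (i + 1) ((grid.length : Int) - (i + 1))))) none none (-1)).getD []) = true ∧
        min (i + 1) ((grid.length : Int) - (i + 1)) > st.1
      then (min (i + 1) ((grid.length : Int) - (i + 1)), i) else st) =
    (if pvExpandOK grid i (i + 1) = true then
        if min (i + 1) ((grid.length : Int) - 1 - i) > st.1 then (min (i + 1) ((grid.length : Int) - 1 - i), i) else st
      else st) := by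
  set n : Int := (grid.length : Int) with hn
  have hmeq : min (i + 1) (n - 1 - i) = min (i + 1) (n - (i + 1)) := by omega
  rw [hmeq]
  set m : Int := min (i + 1) (n - (i + 1)) with hm
  have hm2 : m ≤ i + 1 := min_le_left _ _
  have hm3 : m ≤ n - (i + 1) := min_le_right _ _
  have hm0 : 0 < m := by omega
  have hmt : ((m.toNat : ℕ) : Int) = m := Int.toNat_of_nonneg (by omega)
  have hE : pvExpandOK grid i (i + 1) =
      decide (∀ j : ℕ, j < m.toNat → grid.getD (i - (j : Int)).toNat "" = grid.getD (i + 1 + (j : Int)).toNat "") := by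
    apply pvExpandOK_eq grid m.toNat i (i + 1) (by omega) (by omega) (by omega) (by omega)
    rcases min_choice (i + 1) (n - (i + 1)) with h | h <;> rw [← hm] at h <;> omega
  rw [pvSlice_eq grid i h0 (by omega), ← hE]
  cases hx : pvExpandOK grid i (i + 1) <;> simp

-- the best reflection size tracked by B's fold stays nonnegative
lemma pvFold_nonneg (grid : List String) (l : List Int) : ∀ (st : Int × Int), 0 ≤ st.1 →
    0 ≤ (l.foldl
      (fun (st : Int × Int) (i : Int) =>
        if pvExpandOK grid i (i + 1) then
          if min (i + 1) ((grid.length : Int) - 1 - i) > st.1 then (min (i + 1) ((grid.length : Int) - 1 - i), i) else st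
        else st)
      st).1 := by
  induction l with
  | nil => intro st h; exact h
  | cons x xs ih =>
    intro st h
    simp only [List.foldl_cons]
    apply ih
    split_ifs with h1 h2
    · simp only; omega
    · exact h
    · exact h

-- ===== VERDICT (by name: the statement is the Claim_ definition above) =====
theorem find_reflection_point_spec : Claim_equal_find_reflection_point := by
  intro grid _
  unfold Spec_find_reflection_point find_reflection_point find_reflection_point_alt
  simp only []
  rcases grid with _ | ⟨x, xs⟩
  · rfl
  · set grid : List String := x :: xs with hgrid
    set n : Int := (grid.length : Int) with hn
    have hn1 : 1 ≤ n := by simp [hn, hgrid]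
    have hsplit : PySem.List.pyRange 0 n 1 = PySem.List.pyRange 0 (n - 1) 1 ++ [n - 1] := by
      have h := PySem.List.pyRange_one_succ_right (a := 0) (b := n - 1) (by omega)
      rw [show n - 1 + 1 = n by ring] at h
      exact h
    rw [hsplit, List.foldl_append]
    simp only [List.foldl_cons, List.foldl_nil]
    rw [PySem.List.foldl_congr_mem _ _
      (fun (st : Int × Int) (i : Int) =>
        if pvExpandOK grid i (i + 1) = true then
          if min (i + 1) ((grid.length : Int) - 1 - i) > st.1 then (min (i + 1) ((grid.length : Int) - 1 - i), i) else st
        else st)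
      _ (fun st i hi => by
      rcases (PySem.List.mem_pyRange_one).1 hi with ⟨hi0, hi1⟩
      exact pvStep_eq grid st i hi0 hi1)]
    set res := (PySem.List.pyRange 0 (n - 1) 1).foldl
      (fun (st : Int × Int) (i : Int) =>
        if pvExpandOK grid i (i + 1) then
          if min (i + 1) ((grid.length : Int) - 1 - i) > st.1 then (min (i + 1) ((grid.length : Int) - 1 - i), i) else st
        else st)
      (0, n - 1) with hres
    have hnonneg : 0 ≤ res.1 := pvFold_nonneg grid _ (0, n - 1) (by norm_num)
    have hcond : ¬ ((PySem.List.slice grid (some (n - 1 + 1 - min (n - 1 + 1) (n - (n - 1 + 1)))) (some (n - 1 + 1)) ==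
        (PySem.List.slice? (PySem.List.slice grid (some (n - 1 + 1)) (some (n - 1 + 1 + min (n - 1 + 1) (n - (n - 1 + 1))))) none none (-1)).getD []) = true ∧
        min (n - 1 + 1) (n - (n - 1 + 1)) > res.1) := by
      rintro ⟨-, hgt⟩
      have : min (n - 1 + 1) (n - (n - 1 + 1)) ≤ 0 := by
        have := min_le_right (n - 1 + 1) (n - (n - 1 + 1))
        omega
      omega
    rw [if_neg hcond]
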